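-- pv_equiv track=rewrite | github.com/Stampfo/Stuff | spyderGdsii.py | findoutermostmarks
-- ===== SOURCE A (Python) =====
-- def findoutermostmarks(marks):   # and sort them
--     LL=[0,-100000000]
--     LR=[0,-100000000]
--     UR=[0,-100000000]
--     UL=[0,-100000000]
--     for markindex,mark in enumerate(marks):
--         LLscore=-mark[0]-mark[1]
--         LRscore=-mark[0]+mark[1]
--         ULscore=mark[0]-mark[1]
--         URscore=mark[0]+mark[1]
--         if LLscore>LL[1]:
--             LL[1]=LLscore
--             LL[0]=markindex
--         if LRscore>LR[1]:
--             LR[1]=LRscore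
--             LR[0]=markindex
--         if ULscore>UL[1]:
--             UL[1]=ULscore
--             UL[0]=markindex
--         if URscore>UR[1]:
--             UR[1]=URscore
--             UR[0]=markindex
--     return [marks[LL[0]],marks[LR[0]],marks[UL[0]],marks[UR[0]]]
-- ===== SOURCE B (Python) =====
-- def findoutermostmarks(marks):   # and sort them
--     def pick(score):
--         best_i, best_s = 0, -100000000
--         for i, m in enumerate(marks):
--             s = score(m)
--             if s > best_s:
--                 best_i, best_s = i, s
--         return marks[best_i]
--     return [pick(lambda m: -m[0] - m[1]),
--             pick(lambda m: -m[0] + m[1]),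
--             pick(lambda m: m[0] - m[1]),
--             pick(lambda m: m[0] + m[1])]
-- ===== Notes on version B (the rewrite author's own statement) =====
-- stated objective: idiomatic
-- what changed: The single fused loop carrying four (index,score) state pairs is replaced by one generic single-corner argmax helper applied to four score functions, one independent scan per corner.
import Mathlib
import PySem

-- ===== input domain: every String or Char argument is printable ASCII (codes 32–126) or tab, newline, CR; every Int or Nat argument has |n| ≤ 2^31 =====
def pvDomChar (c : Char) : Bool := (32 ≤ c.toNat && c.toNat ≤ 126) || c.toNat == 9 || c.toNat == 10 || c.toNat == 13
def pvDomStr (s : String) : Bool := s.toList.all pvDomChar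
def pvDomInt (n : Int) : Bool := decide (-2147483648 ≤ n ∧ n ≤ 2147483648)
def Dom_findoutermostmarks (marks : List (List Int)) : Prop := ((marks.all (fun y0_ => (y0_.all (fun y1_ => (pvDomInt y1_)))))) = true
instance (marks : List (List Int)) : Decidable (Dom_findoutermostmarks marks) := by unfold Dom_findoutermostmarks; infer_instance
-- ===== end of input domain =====

-- B replaces A's fused four-state loop by one generic single-corner argmax helper applied to four
-- score functions (one independent scan per corner); return value only, neither mutates its argument.

-- ===== PORT A =====
def findoutermostmarks (marks : List (List Int)) : List (List Int) :=
  let st := (PySem.List.enumerate marks 0).foldl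
    (fun (st : (Int × Int) × (Int × Int) × (Int × Int) × (Int × Int)) p =>
      let LLscore := -(PySem.List.pyGetD p.2 0 0) - PySem.List.pyGetD p.2 1 0
      let LRscore := -(PySem.List.pyGetD p.2 0 0) + PySem.List.pyGetD p.2 1 0
      let ULscore := PySem.List.pyGetD p.2 0 0 - PySem.List.pyGetD p.2 1 0
      let URscore := PySem.List.pyGetD p.2 0 0 + PySem.List.pyGetD p.2 1 0
      let LL := if LLscore > st.1.2 then (p.1, LLscore) else st.1
      let LR := if LRscore > st.2.1.2 then (p.1, LRscore) else st.2.1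
      let UL := if ULscore > st.2.2.1.2 then (p.1, ULscore) else st.2.2.1
      let UR := if URscore > st.2.2.2.2 then (p.1, URscore) else st.2.2.2
      (LL, LR, UL, UR))
    ((0, -100000000), (0, -100000000), (0, -100000000), (0, -100000000))
  [PySem.List.pyGetD marks st.1.1 [], PySem.List.pyGetD marks st.2.1.1 [],
   PySem.List.pyGetD marks st.2.2.1.1 [], PySem.List.pyGetD marks st.2.2.2.1 []]

-- ===== PORT B =====
-- generic argmax-by-score helper (Source B's `pick`)
def pickCorner (marks : List (List Int)) (score : List Int → Int) : List Int :=
  let st := (PySem.List.enumerate marks 0).foldl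
    (fun (b : Int × Int) p => let s := score p.2; if s > b.2 then (p.1, s) else b)
    (0, -100000000)
  PySem.List.pyGetD marks st.1 []

def findoutermostmarks_alt (marks : List (List Int)) : List (List Int) :=
  [pickCorner marks (fun m => -(PySem.List.pyGetD m 0 0) - PySem.List.pyGetD m 1 0),
   pickCorner marks (fun m => -(PySem.List.pyGetD m 0 0) + PySem.List.pyGetD m 1 0),
   pickCorner marks (fun m => PySem.List.pyGetD m 0 0 - PySem.List.pyGetD m 1 0),
   pickCorner marks (fun m => PySem.List.pyGetD m 0 0 + PySem.List.pyGetD m 1 0)]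

-- ===== PRECONDITION & SPEC =====
-- Pre_ excludes exactly the inputs where the Python A raises IndexError:
-- the empty list (marks[LL[0]] fails) and any mark shorter than 2 (mark[1] fails).
def Pre_findoutermostmarks (marks : List (List Int)) : Prop :=
  marks ≠ [] ∧ ∀ m ∈ marks, 2 ≤ m.length
instance (marks : List (List Int)) : Decidable (Pre_findoutermostmarks marks) := by
  unfold Pre_findoutermostmarks; infer_instance
def pvWitness_findoutermostmarks : List (List Int) := [[-1, -1], [1, 1], [-1, 1], [1, -1]]

def Spec_findoutermostmarks (marks : List (List Int)) (out : List (List Int)) : Prop := out = findoutermostmarks_alt marks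
instance (marks : List (List Int)) (out : List (List Int)) : Decidable (Spec_findoutermostmarks marks out) := by unfold Spec_findoutermostmarks; infer_instance

-- ===== CLAIM (what is proved, stated in full; the proofs are below) =====
def Claim_equal_findoutermostmarks : Prop := ∀ (marks : List (List Int)), Dom_findoutermostmarks marks → Pre_findoutermostmarks marks → Spec_findoutermostmarks marks (findoutermostmarks marks)

-- ===== LEMMAS AND PROOFS =====
-- A's fused fold over a four-pair state equals the four independent component folds.
lemma fused_foldl_eq (f1 f2 f3 f4 : List Int → Int) :
    ∀ (l : List (Int × List Int)) (a b c d : Int × Int),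
    l.foldl
      (fun (st : (Int × Int) × (Int × Int) × (Int × Int) × (Int × Int)) p =>
        (if f1 p.2 > st.1.2 then (p.1, f1 p.2) else st.1,
         if f2 p.2 > st.2.1.2 then (p.1, f2 p.2) else st.2.1,
         if f3 p.2 > st.2.2.1.2 then (p.1, f3 p.2) else st.2.2.1,
         if f4 p.2 > st.2.2.2.2 then (p.1, f4 p.2) else st.2.2.2)) (a, b, c, d)
    = (l.foldl (fun b p => if f1 p.2 > b.2 then (p.1, f1 p.2) else b) a,
       l.foldl (fun b p => if f2 p.2 > b.2 then (p.1, f2 p.2) else b) b,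
       l.foldl (fun b p => if f3 p.2 > b.2 then (p.1, f3 p.2) else b) c,
       l.foldl (fun b p => if f4 p.2 > b.2 then (p.1, f4 p.2) else b) d)
  | [], a, b, c, d => rfl
  | p :: l, a, b, c, d => by
      simp only [List.foldl_cons]
      exact fused_foldl_eq f1 f2 f3 f4 l _ _ _ _

-- ===== VERDICT (by name: the statement is the Claim_ definition above) =====
theorem findoutermostmarks_spec : Claim_equal_findoutermostmarks := by
  intro marks _ _
  unfold Spec_findoutermostmarks findoutermostmarks findoutermostmarks_alt pickCorner
  simp only []
  rw [fused_foldl_eq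
        (fun m => -(PySem.List.pyGetD m 0 0) - PySem.List.pyGetD m 1 0)
        (fun m => -(PySem.List.pyGetD m 0 0) + PySem.List.pyGetD m 1 0)
        (fun m => PySem.List.pyGetD m 0 0 - PySem.List.pyGetD m 1 0)
        (fun m => PySem.List.pyGetD m 0 0 + PySem.List.pyGetD m 1 0)]
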